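-- pv_equiv track=rewrite | github.com/Emvista/popcorn-dataset | src/pre_processing/2_encode_texts.py | get_word_offsets
-- ===== SOURCE A (Python) =====
-- def get_word_offsets(nltk_text: list, label: dict) -> tuple[int, int]:
--     """Add the starting and ending word indexes of the label.
--
--     Args:
--         nltk_text (list): tokenized text with offsets.
--         label (dict): entity label.
--
--     Returns:
--         tuple[int, int]: start and end word indexes.
--     """
--
--     start_label_offset, end_label_offset = label["start"], label["end"]
--     start_word_index = None
--     for word_index, (_, (start_word_offset, end_word_offset)) in enumerate(nltk_text):
--         if start_word_offset == start_label_offset: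
--             start_word_index = word_index
--         if end_word_offset == end_label_offset:
--             return start_word_index, word_index
--     return None, None
-- ===== SOURCE B (Python) =====
-- def get_word_offsets(nltk_text: list, label: dict) -> tuple[int, int]:
--     """Two separate searches: first token whose end offset equals the label end,
--     then the last token at or before it whose start offset equals the label start."""
--     start_label_offset, end_label_offset = label["start"], label["end"]
--     end_word_index = next(
--         (i for i, (_, (_, we)) in enumerate(nltk_text) if we == end_label_offset),
--         None,
--     )
--     if end_word_index is None:
--         return None, None
--     start_word_index = next(
--         (
--             i
--             for i, (_, (ws, _)) in reversed(list(enumerate(nltk_text[: end_word_index + 1])))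
--             if ws == start_label_offset
--         ),
--         None,
--     )
--     return start_word_index, end_word_index
-- ===== Notes on version B (the rewrite author's own statement) =====
-- stated objective: alternative
-- what changed: Replaces A's single stateful loop (accumulating the latest start match until the first end match) with two independent searches: a forward next() for the first token whose end offset matches, then a reversed scan over the prefix up to it for the last token whose start offset matches.
import Mathlib
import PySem

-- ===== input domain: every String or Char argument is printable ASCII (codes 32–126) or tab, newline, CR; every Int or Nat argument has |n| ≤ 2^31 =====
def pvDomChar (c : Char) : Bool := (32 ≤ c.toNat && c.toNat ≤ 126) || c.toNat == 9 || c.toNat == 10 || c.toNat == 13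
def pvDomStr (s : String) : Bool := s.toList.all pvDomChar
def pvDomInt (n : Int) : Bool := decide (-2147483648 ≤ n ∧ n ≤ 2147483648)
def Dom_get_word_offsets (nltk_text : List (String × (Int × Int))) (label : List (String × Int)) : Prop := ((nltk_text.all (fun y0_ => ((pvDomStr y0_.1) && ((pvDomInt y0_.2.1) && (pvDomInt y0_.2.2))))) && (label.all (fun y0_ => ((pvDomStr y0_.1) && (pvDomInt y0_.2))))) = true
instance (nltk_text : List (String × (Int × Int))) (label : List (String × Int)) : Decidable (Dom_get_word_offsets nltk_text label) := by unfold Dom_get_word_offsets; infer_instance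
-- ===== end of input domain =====

-- ===== PORT A =====
-- B replaces A's single stateful loop with two independent searches (first end match, then
-- reversed scan for the last start match); alternative decomposition, same O(n) cost.
-- A's loop: enumerate with an Int index, carrying the latest start-matching index.
def pvALoop (sOff eOff : Int) : List (String × (Int × Int)) → Int → Option Int → Option Int × Option Int
  | [], _, _ => (none, none)
  | (_, (ws, we)) :: rest, i, acc =>
    let acc' := if ws == sOff then some i else acc
    if we == eOff then (acc', some i) else pvALoop sOff eOff rest (i + 1) acc'

def get_word_offsets (nltk_text : List (String × (Int × Int))) (label : List (String × Int)) : Option Int × Option Int :=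
  match PySem.Dict.get? (PySem.Dict.mk label) "start", PySem.Dict.get? (PySem.Dict.mk label) "end" with
  | some sOff, some eOff => pvALoop sOff eOff nltk_text 0 none
  | _, _ => (none, none)   -- KeyError in Python; excluded by Pre_

-- ===== PORT B =====
def get_word_offsets_alt (nltk_text : List (String × (Int × Int))) (label : List (String × Int)) : Option Int × Option Int :=
  match PySem.Dict.get? (PySem.Dict.mk label) "start" with
  | none => (none, none)   -- KeyError in Python; excluded by Pre_
  | some sOff =>
  match PySem.Dict.get? (PySem.Dict.mk label) "end" with
  | none => (none, none)   -- KeyError in Python; excluded by Pre_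
  | some eOff =>
    match (PySem.List.enumerate nltk_text 0).find? (fun p => p.2.2.2 == eOff) with
    | none => (none, none)
    | some (e, _) =>
      let pref := PySem.List.slice nltk_text none (some (e + 1))
      (((PySem.List.enumerate pref 0).reverse.find? (fun p => p.2.2.1 == sOff)).map (·.1), some e)

-- ===== PRECONDITION & SPEC =====
-- A (and B) raise KeyError unless the label dict has both "start" and "end" keys.
def Pre_get_word_offsets (nltk_text : List (String × (Int × Int))) (label : List (String × Int)) : Prop :=
  (PySem.Dict.get? (PySem.Dict.mk label) "start").isSome ∧ (PySem.Dict.get? (PySem.Dict.mk label) "end").isSome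
instance (nltk_text : List (String × (Int × Int))) (label : List (String × Int)) : Decidable (Pre_get_word_offsets nltk_text label) := by unfold Pre_get_word_offsets; infer_instance

def pvWitness_get_word_offsets : (List (String × (Int × Int))) × (List (String × Int)) :=
  ([("ab", (0, 2)), ("cd", (3, 5))], [("start", 3), ("end", 5)])

def Spec_get_word_offsets (nltk_text : List (String × (Int × Int))) (label : List (String × Int)) (out : Option Int × Option Int) : Prop := out = get_word_offsets_alt nltk_text label
instance (nltk_text : List (String × (Int × Int))) (label : List (String × Int)) (out : Option Int × Option Int) : Decidable (Spec_get_word_offsets nltk_text label out) := by unfold Spec_get_word_offsets; infer_instance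

-- ===== CLAIM (what is proved, stated in full; the proofs are below) =====
def Claim_equal_get_word_offsets : Prop := ∀ (nltk_text : List (String × (Int × Int))) (label : List (String × Int)), Dom_get_word_offsets nltk_text label → Pre_get_word_offsets nltk_text label → Spec_get_word_offsets nltk_text label (get_word_offsets nltk_text label)

-- ===== LEMMAS AND PROOFS =====

-- proof-side helper: A's accumulator value at the moment the loop returns
def pvLastS (sOff eOff : Int) : List (String × (Int × Int)) → Int → Option Int → Option Int
  | [], _, acc => acc
  | (_, (ws, we)) :: rest, i, acc =>
    let acc' := if ws == sOff then some i else acc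
    if we == eOff then acc' else pvLastS sOff eOff rest (i + 1) acc'

-- A's loop = (accumulator at first end match, index of first end match)
theorem pvALoop_eq_find (sOff eOff : Int) (l : List (String × (Int × Int))) (i : Int) (acc : Option Int) :
    pvALoop sOff eOff l i acc =
      match (PySem.List.enumerate l i).find? (fun p => p.2.2.2 == eOff) with
      | none => (none, none)
      | some (e, _) => (pvLastS sOff eOff l i acc, some e) := by
  induction l generalizing i acc with
  | nil => simp [pvALoop, PySem.List.enumerate]
  | cons x rest ih =>
    obtain ⟨nm, ws, we⟩ := x
    rw [PySem.List.enumerate_cons]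
    by_cases hend : (we == eOff) = true
    · simp [pvALoop, pvLastS, hend]
    · simp only [pvALoop, pvLastS, List.find?_cons]
      simp only [Bool.not_eq_true] at hend
      simp [hend, ih]

-- the first end match sits at a Nat offset inside l
theorem pvFind_shape (eOff : Int) (l : List (String × (Int × Int))) (i : Int) (e : Int)
    (w : String × (Int × Int))
    (h : (PySem.List.enumerate l i).find? (fun p => p.2.2.2 == eOff) = some (e, w)) :
    ∃ k : Nat, e = i + k ∧ k < l.length := by
  have hmem := List.mem_of_find?_eq_some h
  rw [PySem.List.mem_enumerate_iff] at hmem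
  obtain ⟨k, hk, hpq⟩ := hmem
  exact ⟨k, by simpa using congrArg Prod.fst hpq, hk⟩

-- the accumulator at the first end match = reversed find over the prefix, falling back to acc
theorem pvLastS_eq_revfind (sOff eOff : Int) (l : List (String × (Int × Int))) (i : Int)
    (acc : Option Int) (k : Nat) (w : String × (Int × Int))
    (h : (PySem.List.enumerate l i).find? (fun p => p.2.2.2 == eOff) = some (i + k, w)) :
    pvLastS sOff eOff l i acc =
      ((((PySem.List.enumerate (l.take (k + 1)) i).reverse.find? (fun p => p.2.2.1 == sOff)).map (·.1)).or acc) := by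
  induction l generalizing i acc k with
  | nil => simp [PySem.List.enumerate] at h
  | cons x rest ih =>
    obtain ⟨nm, ws, we⟩ := x
    rw [PySem.List.enumerate_cons] at h
    by_cases hend : (we == eOff) = true
    · -- the head is the first end match: k = 0
      rw [List.find?_cons] at h
      simp only [hend] at h
      have hk0 : k = 0 := by
        have := congrArg Prod.fst (Option.some.inj h)
        simp at this; omega
      subst hk0
      simp only [List.take, PySem.List.enumerate_cons, PySem.List.enumerate_nil]
      by_cases hws : (ws == sOff) = true <;>
        simp [pvLastS, hend, hws, Option.or]
    · simp only [Bool.not_eq_true] at hend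
      rw [List.find?_cons] at h
      simp only [hend] at h
      -- h : find? on enumerate rest (i+1) = some (i+k, w); hence k ≥ 1
      obtain ⟨k', hk', _⟩ := pvFind_shape eOff rest (i + 1) (i + k) w (by simpa using h)
      have hkk : k = k' + 1 := by omega
      subst hkk
      have h' : (PySem.List.enumerate rest (i + 1)).find? (fun p => p.2.2.2 == eOff)
          = some ((i + 1) + (k' : Int), w) := by
        rw [show (i + 1) + (k' : Int) = i + ((k' : Int) + 1) by ring]
        simpa using h
      have hrec := ih (i + 1) (if ws == sOff then some i else acc) k' h'
      simp only [pvLastS, hend]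
      simp only [Bool.false_eq_true, if_false]
      rw [hrec]
      -- unfold the reversed find over the cons prefix
      simp only [List.take, PySem.List.enumerate_cons, List.reverse_cons, List.find?_append]
      cases hfl : (PySem.List.enumerate (rest.take (k' + 1)) (i + 1)).reverse.find? (fun p => p.2.2.1 == sOff) with
      | some p => simp [Option.or]
      | none =>
        by_cases hws : (ws == sOff) = true <;>
          simp [hws, Option.or]

-- ===== VERDICT (by name: the statement is the Claim_ definition above) =====
theorem get_word_offsets_spec : Claim_equal_get_word_offsets := by
  intro nltk_text label _ hpre
  unfold Spec_get_word_offsets get_word_offsets get_word_offsets_alt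
  obtain ⟨hs, he⟩ := hpre
  obtain ⟨sOff, hs⟩ := Option.isSome_iff_exists.mp hs
  obtain ⟨eOff, he⟩ := Option.isSome_iff_exists.mp he
  rw [hs, he]
  dsimp only
  rw [pvALoop_eq_find]
  cases hf : (PySem.List.enumerate nltk_text 0).find? (fun p => p.2.2.2 == eOff) with
  | none => simp
  | some p =>
    obtain ⟨e, w⟩ := p
    obtain ⟨k, hk, hklen⟩ := pvFind_shape eOff nltk_text 0 e w hf
    subst hk
    simp only [zero_add] at hf ⊢
    rw [pvLastS_eq_revfind sOff eOff nltk_text 0 none k w (by simpa using hf)]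
    have hslice : PySem.List.slice nltk_text none (some ((k : Int) + 1)) = nltk_text.take (k + 1) := by
      have := PySem.List.slice_to_natCast (xs := nltk_text) (b := k + 1)
      simpa using this
    rw [hslice]
    cases (PySem.List.enumerate (nltk_text.take (k + 1)) 0).reverse.find? (fun p => p.2.2.1 == sOff) <;> rfl
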